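-- pv_equiv track=rewrite | github.com/benquick123/code-profiling | code/batch-1/vse-naloge-brez-testov/DN6-M-44.py | prestej_tvite
-- ===== SOURCE A (Python) =====
-- def prestej_tvite(tviti):
--     s = {}
--     y = 1
--     for e in tviti:
--         if e.split(":")[0] in s:
--             x = e.split(":")[0]
--             s[x] += y
--         else:
--             x = e.split(":")[0]
--             s[x] = y
--
--     return s
-- ===== SOURCE B (Python) =====
-- def prestej_tvite(tviti):
--     prefixes = [e.split(":")[0] for e in tviti]
--     return {p: prefixes.count(p) for p in dict.fromkeys(prefixes)}
-- ===== Notes on version B (the rewrite author's own statement) =====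
-- stated objective: simpler
-- what changed: A counts by incrementally updating a hash map inside the loop; B first extracts the prefix list, deduplicates it in first-occurrence order with dict.fromkeys, and builds the result in one comprehension using list.count per distinct prefix.
import Mathlib
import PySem

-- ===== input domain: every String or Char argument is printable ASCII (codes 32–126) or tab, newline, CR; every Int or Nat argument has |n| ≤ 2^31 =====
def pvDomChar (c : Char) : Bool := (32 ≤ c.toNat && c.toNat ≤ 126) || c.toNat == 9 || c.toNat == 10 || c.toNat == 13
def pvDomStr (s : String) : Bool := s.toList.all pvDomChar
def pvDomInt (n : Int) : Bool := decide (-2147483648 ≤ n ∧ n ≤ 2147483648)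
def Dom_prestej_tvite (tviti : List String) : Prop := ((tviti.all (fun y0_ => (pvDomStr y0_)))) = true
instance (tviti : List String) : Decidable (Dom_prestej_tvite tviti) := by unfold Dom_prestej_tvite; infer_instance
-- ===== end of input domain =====

-- B replaces A's incremental hash-map counting loop by a dedup-of-prefixes + per-key count comprehension (simpler, not faster).

-- e.split(":")[0] — exact: the separator ":" is nonempty so split? is some, and str.split
-- always returns at least one piece, so Python's [0] is its head and never raises.
def pvPrefix (e : String) : String := ((PySem.Str.split? e ":").getD []).headD ""

-- ===== PORT A =====
def prestej_tvite (tviti : List String) : List (String × Int) :=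
  let y : Int := 1
  (tviti.foldl (fun s e =>
      if s.contains (pvPrefix e) then
        let x := pvPrefix e
        s.insert x (s.getD x 0 + y)
      else
        let x := pvPrefix e
        s.insert x y)
    PySem.Dict.empty).items

-- ===== PORT B =====
def prestej_tvite_alt (tviti : List String) : List (String × Int) :=
  let prefixes := tviti.map (fun e => pvPrefix e)
  (PySem.Dict.ofList ((PySem.List.dedup prefixes).map
      (fun p => (p, (PySem.List.count prefixes p : Int))))).items

-- ===== PRECONDITION & SPEC =====
def Spec_prestej_tvite (tviti : List String) (out : List (String × Int)) : Prop := out = prestej_tvite_alt tviti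
instance (tviti : List String) (out : List (String × Int)) : Decidable (Spec_prestej_tvite tviti out) := by unfold Spec_prestej_tvite; infer_instance

-- ===== CLAIM (what is proved, stated in full; the proofs are below) =====
def Claim_equal_prestej_tvite : Prop := ∀ (tviti : List String), Dom_prestej_tvite tviti → Spec_prestej_tvite tviti (prestej_tvite tviti)

-- ===== LEMMAS AND PROOFS =====

-- A's conditional loop body is exactly the counter step, so A's dict is Counter(prefixes)
lemma prestej_A_eq_counter (tviti : List String) :
    prestej_tvite tviti = (PySem.Dict.counter (tviti.map pvPrefix)).items := by
  unfold prestej_tvite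
  rw [← PySem.Dict.foldl_insert_getD_add_one_eq_counter, List.foldl_map]
  show (List.foldl (fun s e =>
      if s.contains (pvPrefix e) then s.insert (pvPrefix e) (s.getD (pvPrefix e) 0 + (1 : Int))
      else s.insert (pvPrefix e) (1 : Int)) PySem.Dict.empty tviti).items = _
  congr 1
  refine congrArg (fun f => List.foldl f PySem.Dict.empty tviti)
    (funext fun s => funext fun e => ?_)
  by_cases h : s.contains (pvPrefix e)
  · simp [h]
  · simp only [Bool.not_eq_true] at h
    simp [h, PySem.Dict.getD_of_not_contains s 0 h]

-- B's dict comprehension over distinct keys: its items are exactly the pair list it was built from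
lemma prestej_B_items (tviti : List String) :
    prestej_tvite_alt tviti =
      (PySem.List.dedup (tviti.map pvPrefix)).map
        (fun p => (p, (PySem.List.count (tviti.map pvPrefix) p : Int))) := by
  unfold prestej_tvite_alt
  show (PySem.Dict.ofList _).items = _
  rw [show (PySem.Dict.ofList ((PySem.List.dedup (tviti.map pvPrefix)).map
        (fun p => (p, (PySem.List.count (tviti.map pvPrefix) p : Int)))) : PySem.Dict String Int)
      = (PySem.List.dedup (tviti.map pvPrefix)).foldl
          (fun d p => d.insert p (PySem.List.count (tviti.map pvPrefix) p : Int))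
          PySem.Dict.empty from by
    simp [PySem.Dict.ofList, PySem.Dict.update, List.foldl_map]]
  rw [PySem.Dict.items_foldl_insert_fresh _ (fun p => p) _ _
        (by intro a _; exact PySem.Dict.contains_empty _)
        (by simp)]
  rfl

-- ===== VERDICT (by name: the statement is the Claim_ definition above) =====
theorem prestej_tvite_spec : Claim_equal_prestej_tvite := by
  intro tviti _
  unfold Spec_prestej_tvite
  rw [prestej_A_eq_counter, prestej_B_items, PySem.Dict.items_counter]
  simp [PySem.List.dedup_eq_ofList]
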